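-- pv_equiv track=rewrite | github.com/wangerzi/deeplearning-examples | k-neighbour/main.py | vote_label_by_num
-- ===== SOURCE A (Python) =====
-- def vote_label_by_num(neighbors):
--     vote_map = {}
--     for row in neighbors:
--         label = row[0][-1]
--         if label in vote_map:
--             vote_map[label] += 1
--         else:
--             vote_map[label] = 1
--     sorted_map = sorted(vote_map.items(), key=lambda v: v[1], reverse=True)
--     return sorted_map[0][0]
-- ===== SOURCE B (Python) =====
-- def vote_label_by_num(neighbors):
--     labels = [row[0][-1] for row in neighbors]
--     best_label = labels[0]
--     best_count = 0
--     seen = []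
--     for label in labels:
--         if label in seen:
--             continue
--         seen.append(label)
--         c = labels.count(label)
--         if c > best_count:
--             best_label = label
--             best_count = c
--     return best_label
-- ===== Notes on version B (the rewrite author's own statement) =====
-- stated objective: alternative
-- what changed: B builds no dict and never sorts: it extracts the label list once, then makes a single pass over it keeping a seen-list, counting each first-occurrence label with labels.count and keeping a running strict-max (first distinct label with maximal count), which equals A's dict-count plus stable reverse sort plus head.
-- outside the precondition, e.g. on vote_label_by_num([]): A raises IndexError, B raises IndexError; on vote_label_by_num([[]]): A raises IndexError, B raises IndexError
import Mathlib
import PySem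

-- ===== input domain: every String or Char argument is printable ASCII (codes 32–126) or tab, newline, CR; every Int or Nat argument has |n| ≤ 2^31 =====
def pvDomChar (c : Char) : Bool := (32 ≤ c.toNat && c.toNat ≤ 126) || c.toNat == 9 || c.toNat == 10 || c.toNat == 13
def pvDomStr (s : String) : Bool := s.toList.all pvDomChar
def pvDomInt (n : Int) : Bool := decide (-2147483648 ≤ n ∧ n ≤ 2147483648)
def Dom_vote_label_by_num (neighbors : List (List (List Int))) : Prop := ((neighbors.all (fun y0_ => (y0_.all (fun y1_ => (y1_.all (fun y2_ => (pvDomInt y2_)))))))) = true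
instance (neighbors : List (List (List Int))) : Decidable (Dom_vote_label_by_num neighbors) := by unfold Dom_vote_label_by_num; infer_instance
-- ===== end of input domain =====

-- B drops A's dict+sort entirely: it scans the distinct labels in first-occurrence order, counts each with list.count, and keeps a running strict-max — same winner and tie-break (first-inserted maximal label).


-- ===== PORT A =====
-- label = row[0][-1]  (pyGet? = Python indexing; the .getD defaults are only reached outside Pre_)
def pvLabel (row : List (List Int)) : Int :=
  (PySem.List.pyGet? ((PySem.List.pyGet? row 0).getD []) (-1)).getD 0

def voteMapA (neighbors : List (List (List Int))) : PySem.Dict Int Int :=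
  neighbors.foldl (fun vm row =>
    let label := pvLabel row
    if PySem.Dict.contains vm label then
      PySem.Dict.insert vm label ((PySem.Dict.get? vm label).getD 0 + 1)
    else
      PySem.Dict.insert vm label 1) PySem.Dict.empty

def vote_label_by_num (neighbors : List (List (List Int))) : Int :=
  let vote_map := voteMapA neighbors
  let sorted_map := PySem.List.sorted (PySem.Dict.items vote_map) (fun v => v.2) true
  ((PySem.List.pyGet? sorted_map 0).getD (0, 0)).1

-- ===== PORT B =====
-- labels = [row[0][-1] for row in neighbors]; then one pass with (best_label, best_count, seen),
-- skipping labels already seen and counting each new label with labels.count(label).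
-- the loop body: skip an already-seen label, else record it and improve best on a strictly greater count
def bStep (labels : List Int) (st : Int × Int × List Int) (label : Int) : Int × Int × List Int :=
  if st.2.2.contains label then st
  else
    let seen := st.2.2 ++ [label]
    let c : Int := labels.count label
    if st.2.1 < c then (label, c, seen) else (st.1, st.2.1, seen)

def vote_label_by_num_alt (neighbors : List (List (List Int))) : Int :=
  let labels := neighbors.map (fun row =>
    (PySem.List.pyGet? ((PySem.List.pyGet? row 0).getD []) (-1)).getD 0)
  let st := labels.foldl (bStep labels) ((PySem.List.pyGet? labels 0).getD 0, 0, [])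
  st.1

-- ===== PRECONDITION & SPEC =====
-- Pre_ excludes exactly the inputs where A raises: empty neighbor list (IndexError on sorted_map[0])
-- and any row with row == [] or row[0] == [] (IndexError in row[0][-1]); B raises there too.
def Pre_vote_label_by_num (neighbors : List (List (List Int))) : Prop :=
  neighbors ≠ [] ∧ ∀ row ∈ neighbors, row.headD [] ≠ []
instance (neighbors : List (List (List Int))) : Decidable (Pre_vote_label_by_num neighbors) := by
  unfold Pre_vote_label_by_num; infer_instance

def pvWitness_vote_label_by_num : List (List (List Int)) := [[[1, 2]], [[3]], [[1, 3]]]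

def Spec_vote_label_by_num (neighbors : List (List (List Int))) (out : Int) : Prop := out = vote_label_by_num_alt neighbors
instance (neighbors : List (List (List Int))) (out : Int) : Decidable (Spec_vote_label_by_num neighbors out) := by unfold Spec_vote_label_by_num; infer_instance

-- ===== CLAIM (what is proved, stated in full; the proofs are below) =====
def Claim_equal_vote_label_by_num : Prop := ∀ (neighbors : List (List (List Int))), Dom_vote_label_by_num neighbors → Pre_vote_label_by_num neighbors → Spec_vote_label_by_num neighbors (vote_label_by_num neighbors)

-- ===== LEMMAS AND PROOFS =====

-- A's counting loop over the label list is Counter(labels)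
lemma voteMapA_eq_counter (neighbors : List (List (List Int))) :
    voteMapA neighbors =
      PySem.Dict.counter (neighbors.map pvLabel) := by
  unfold voteMapA
  rw [← PySem.Dict.foldl_insert_getD_add_one_eq_counter, List.foldl_map]
  apply PySem.List.foldl_congr_mem
  intro vm row _
  set label := pvLabel row
  by_cases h : PySem.Dict.contains vm label
  · simp [h, PySem.Dict.getD]
  · have hf : List.find? (fun p => p.1 == label) vm.items = none := by
      rw [List.find?_eq_none]
      intro p hp hb
      exact h (by simp only [PySem.Dict.contains]; exact List.any_eq_true.2 ⟨p, hp, hb⟩)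
    have hg : PySem.Dict.get? vm label = none := by
      simp [PySem.Dict.get?, hf]
    simp [h, PySem.Dict.getD, hg]

-- head of Python's stable reverse sort IS Python's max (first maximal element)
lemma head?_sorted_rev_eq_max? {α κ : Type} [LinearOrder κ] (xs : List α) (key : α → κ) :
    (PySem.List.sorted xs key true).head? = PySem.List.max? xs key := by
  induction xs using List.reverseRecOn with
  | nil => rfl
  | append_singleton t x ih =>
      rw [PySem.List.sorted_rev_eq_foldl_insertBy, List.foldl_append,
          ← PySem.List.sorted_rev_eq_foldl_insertBy]
      simp only [List.foldl_cons, List.foldl_nil]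
      rw [show PySem.List.max? (t ++ [x]) key =
            (match PySem.List.max? t key with
             | none => some x
             | some m => if key m < key x then some x else some m) by
        simp only [PySem.List.max?, List.foldl_append, List.foldl_cons, List.foldl_nil]
        rfl]
      cases hs : PySem.List.sorted t key true with
      | nil =>
          have ht : t = [] := (PySem.List.sorted_eq_nil_iff _ _ _).1 hs
          subst ht
          rfl
      | cons m s =>
          rw [hs] at ih
          simp only [List.head?] at ih
          rw [← ih]
          simp only [PySem.List.insertBy]
          by_cases hlt : key m < key x
          · simp [hlt]
          · simp only [hlt, decide_false, if_false]
            cases s <;> simp [PySem.List.insertBy]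

-- Python's max over a nonempty list is the strict-improvement running fold
lemma max?_cons_eq_foldl {α κ : Type} [LinearOrder κ] (t : List α) (x : α) (key : α → κ) :
    PySem.List.max? (x :: t) key =
      some (t.foldl (fun m y => if key m < key y then y else m) x) := by
  induction t generalizing x with
  | nil => rfl
  | cons y s ih =>
      show PySem.List.max? (x :: y :: s) key = _
      have h1 : PySem.List.max? (x :: y :: s) key =
          PySem.List.max? ((if key x < key y then y else x) :: s) key := by
        simp only [PySem.List.max?, List.foldl_cons]
        by_cases h : key x < key y <;> simp [h]
      rw [h1, ih]
      simp only [List.foldl_cons]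

-- every set grown by Set.update keeps its start as a prefix
lemma prefix_set_update (l s : List Int) : s <+: PySem.Set.update s l := by
  induction l generalizing s with
  | nil => exact List.prefix_refl s
  | cons x t ih =>
      show s <+: PySem.Set.update (PySem.Set.add s x) t
      refine List.IsPrefix.trans ?_ (ih (PySem.Set.add s x))
      simp only [PySem.Set.add]
      split
      · exact List.prefix_refl s
      · exact ⟨[x], rfl⟩

-- B's single pass: the seen-list is Set.update, and best is the strict-max fold over the NEW distinct labels
lemma b_loop_char (labels : List Int) (l : List Int) (s : List Int) (bl bc : Int) :
    l.foldl (bStep labels) (bl, bc, s)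
    = ((((PySem.Set.update s l).drop s.length).foldl
          (fun (m : Int × Int) k =>
            if m.2 < (labels.count k : Int) then (k, (labels.count k : Int)) else m) (bl, bc)).1,
       (((PySem.Set.update s l).drop s.length).foldl
          (fun (m : Int × Int) k =>
            if m.2 < (labels.count k : Int) then (k, (labels.count k : Int)) else m) (bl, bc)).2,
       PySem.Set.update s l) := by
  induction l generalizing s bl bc with
  | nil =>
      simp [PySem.Set.update, List.drop_length]
  | cons x t ih =>
      simp only [List.foldl_cons]
      by_cases h : s.contains x
      · have hadd : PySem.Set.add s x = s := by
          simp only [PySem.Set.add, PySem.Set.contains]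
          rw [if_pos h]
        have hupd : PySem.Set.update s (x :: t) = PySem.Set.update s t := by
          show t.foldl PySem.Set.add (PySem.Set.add s x) = _
          rw [hadd]; rfl
        have hstep : bStep labels (bl, bc, s) x = (bl, bc, s) := by
          simp only [bStep, h, if_true]
        rw [hstep, ih s bl bc, hupd]
      · have hadd : PySem.Set.add s x = s ++ [x] := by
          simp only [PySem.Set.add, PySem.Set.contains]
          rw [if_neg h]
        have hupd : PySem.Set.update s (x :: t) = PySem.Set.update (s ++ [x]) t := by
          show t.foldl PySem.Set.add (PySem.Set.add s x) = _
          rw [hadd]; rfl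
        obtain ⟨r, hr⟩ := prefix_set_update t (s ++ [x])
        have hdropS : (PySem.Set.update (s ++ [x]) t).drop s.length = x :: r := by
          rw [← hr, List.append_assoc, List.drop_left]; rfl
        have hdrop1 : (PySem.Set.update (s ++ [x]) t).drop (s ++ [x]).length = r := by
          rw [← hr]; exact List.drop_left
        by_cases hc : bc < (labels.count x : Int)
        · have hstep : bStep labels (bl, bc, s) x =
              (x, (labels.count x : Int), s ++ [x]) := by
            simp only [bStep, h, hc, if_true, if_false, Bool.false_eq_true]
          rw [hstep, ih (s ++ [x]) x (labels.count x : Int), hupd, hdrop1, hdropS]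
          simp only [List.foldl_cons, hc, if_true]
        · have hstep : bStep labels (bl, bc, s) x = (bl, bc, s ++ [x]) := by
            simp only [bStep, h, hc, if_false, Bool.false_eq_true]
          rw [hstep, ih (s ++ [x]) bl bc, hupd, hdrop1, hdropS]
          simp only [List.foldl_cons, hc, if_false]

-- the common value: first distinct label with maximal count
lemma core_eq (labels : List Int) (hlne : labels ≠ []) :
    ((PySem.List.pyGet? (PySem.List.sorted
        ((PySem.Set.ofList labels).map (fun k => (k, (labels.count k : Int))))
        (fun v => v.2) true) 0).getD (0, 0)).1
    = (labels.foldl (bStep labels) ((PySem.List.pyGet? labels 0).getD 0, 0, [])).1 := by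
  obtain ⟨d0, ds, hdd⟩ : ∃ d0 ds, PySem.Set.ofList labels = d0 :: ds := by
    cases hS : PySem.Set.ofList labels with
    | nil =>
        cases labels with
        | nil => exact absurd rfl hlne
        | cons a l =>
            exfalso
            have ha : a ∈ PySem.Set.ofList (a :: l) := by
              rw [PySem.Set.mem_ofList]; exact List.mem_cons_self
            rw [hS] at ha; cases ha
    | cons d0 ds => exact ⟨d0, ds, rfl⟩
  have hd0mem : d0 ∈ labels := by
    rw [← PySem.Set.mem_ofList, hdd]; exact List.mem_cons_self
  have hcpos : (0 : Int) < (labels.count d0 : Int) := by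
    exact_mod_cast List.count_pos_iff.2 hd0mem
  have hb := b_loop_char labels labels [] ((PySem.List.pyGet? labels 0).getD 0) 0
  rw [show PySem.Set.update ([] : List Int) labels = PySem.Set.ofList labels from rfl, hdd] at hb
  simp only [List.length_nil, List.drop_zero, List.foldl_cons, hcpos, if_true] at hb
  have hA := head?_sorted_rev_eq_max?
      ((d0 :: ds).map (fun k => (k, (labels.count k : Int)))) (fun v : Int × Int => v.2)
  rw [List.map_cons, max?_cons_eq_foldl] at hA
  rw [hdd, List.map_cons]
  cases hs : PySem.List.sorted
      ((d0, (labels.count d0 : Int)) :: ds.map (fun k => (k, (labels.count k : Int))))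
      (fun v => v.2) true with
  | nil =>
      exact absurd ((PySem.List.sorted_eq_nil_iff _ _ _).1 hs) (by simp)
  | cons m t =>
      rw [hs, List.head?_cons, Option.some.injEq] at hA
      rw [show ((PySem.List.pyGet? (m :: t) 0).getD ((0 : Int), (0 : Int))) = m by
        simp [PySem.List.pyGet?, PySem.List.pyIdx?]]
      rw [hA, hb]
      simp [List.foldl_map]

-- ===== VERDICT (by name: the statement is the Claim_ definition above) =====
theorem vote_label_by_num_spec : Claim_equal_vote_label_by_num := by
  intro neighbors _ hpre
  unfold Spec_vote_label_by_num vote_label_by_num vote_label_by_num_alt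
  have hmap : neighbors.map (fun row =>
      (PySem.List.pyGet? ((PySem.List.pyGet? row 0).getD []) (-1)).getD 0) =
      neighbors.map pvLabel := rfl
  simp only [voteMapA_eq_counter, PySem.Dict.items_counter, hmap]
  exact core_eq (neighbors.map pvLabel) (by simpa using hpre.1)
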